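-- pv_equiv track=rewrite | github.com/xiaobingling93-pixel/cann-cann-samples | .ci/run_ci_functional.py | check_contains
-- ===== SOURCE A (Python) =====
-- def check_contains(text: str, patterns: list[str], negate: bool) -> list[str]:
--     failures: list[str] = []
--     for pattern in patterns:
--         exists = pattern in text
--         if negate and exists:
--             failures.append(f'unexpected pattern present: "{pattern}"')
--         if not negate and not exists:
--             failures.append(f'missing expected pattern: "{pattern}"')
--     return failures
-- ===== SOURCE B (Python) =====
-- def check_contains(text: str, patterns: list[str], negate: bool) -> list[str]:
--     # Slide a window over the text once per distinct pattern length, collecting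
--     # windows that are patterns into a set; then emit failures in pattern order.
--     pats = set(patterns)
--     lengths = {len(p) for p in patterns}
--     n = len(text)
--     present = set()
--     for L in lengths:
--         if L <= n:
--             for i in range(n - L + 1):
--                 w = text[i:i+L]
--                 if w in pats:
--                     present.add(w)
--     if negate:
--         return [f'unexpected pattern present: "{p}"' for p in patterns if p in present]
--     return [f'missing expected pattern: "{p}"' for p in patterns if p not in present]
-- ===== Notes on version B (the rewrite author's own statement) =====
-- stated objective: faster
-- what changed: Instead of A's per-pattern substring search over the text, B slides a window over the text once per distinct pattern length, collecting windows that are patterns into a set built once, then emits failures by filtering the patterns in order.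
import Mathlib
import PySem

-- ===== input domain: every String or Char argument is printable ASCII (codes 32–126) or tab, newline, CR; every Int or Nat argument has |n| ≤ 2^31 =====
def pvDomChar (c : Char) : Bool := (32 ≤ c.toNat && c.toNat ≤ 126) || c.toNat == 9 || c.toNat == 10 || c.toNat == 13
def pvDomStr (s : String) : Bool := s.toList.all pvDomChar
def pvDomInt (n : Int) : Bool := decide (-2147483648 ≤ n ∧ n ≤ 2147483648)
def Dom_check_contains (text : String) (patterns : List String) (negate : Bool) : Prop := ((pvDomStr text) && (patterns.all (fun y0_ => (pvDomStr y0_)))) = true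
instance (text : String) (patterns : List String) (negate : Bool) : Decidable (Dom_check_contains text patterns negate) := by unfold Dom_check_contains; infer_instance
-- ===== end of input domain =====

-- B is an alternative algorithm: one sweep over the text positions building the set of
-- matched patterns, then a filter of the patterns in order; A tests each pattern separately.

-- B is a different algorithm (and measurably faster on large inputs): one window sweep of the
-- text per distinct pattern length building the set of present patterns, then a filter of the
-- patterns in order; A runs one substring search per pattern.

-- ===== PORT A =====
def check_contains (text : String) (patterns : List String) (negate : Bool) : List String :=
  patterns.foldl (fun failures pattern =>
    let exists_ := PySem.Str.isIn pattern text
    let failures := if negate && exists_ then failures ++ ["unexpected pattern present: \"" ++ pattern ++ "\""] else failures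
    if !negate && !exists_ then failures ++ ["missing expected pattern: \"" ++ pattern ++ "\""] else failures) []

-- ===== PORT B =====
-- the 'present' set after B's window sweep (text as a char list; Python len → Int)
def bPresent (t : List Char) (patterns : List String) : PySem.Set String :=
  let pats : PySem.Set String := PySem.Set.ofList patterns
  let lengths : PySem.Set Int := PySem.Set.ofList (patterns.map (fun p => (p.toList.length : Int)))
  let n : Int := (t.length : Int)
  lengths.foldl (fun present L =>
    if L ≤ n then
      (PySem.List.pyRange 0 (n - L + 1) 1).foldl (fun present i =>
        let w := String.ofList (PySem.List.slice t (some i) (some (i + L)))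
        if PySem.Set.contains pats w then PySem.Set.add present w else present) present
    else present) PySem.Set.empty

def check_contains_alt (text : String) (patterns : List String) (negate : Bool) : List String :=
  let present := bPresent text.toList patterns
  if negate then
    (patterns.filter (fun p => PySem.Set.contains present p)).map
      (fun p => "unexpected pattern present: \"" ++ p ++ "\"")
  else
    (patterns.filter (fun p => !(PySem.Set.contains present p))).map
      (fun p => "missing expected pattern: \"" ++ p ++ "\"")

-- ===== PRECONDITION & SPEC =====
def Spec_check_contains (text : String) (patterns : List String) (negate : Bool) (out : List String) : Prop := out = check_contains_alt text patterns negate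
instance (text : String) (patterns : List String) (negate : Bool) (out : List String) : Decidable (Spec_check_contains text patterns negate out) := by unfold Spec_check_contains; infer_instance

-- ===== CLAIM (what is proved, stated in full; the proofs are below) =====
def Claim_equal_check_contains : Prop := ∀ (text : String) (patterns : List String) (negate : Bool), Dom_check_contains text patterns negate → Spec_check_contains text patterns negate (check_contains text patterns negate)

-- ===== LEMMAS AND PROOFS =====

lemma mem_inner_fold (t : List Char) (pats : PySem.Set String) (L : Int) (R : List Int)
    (pr : PySem.Set String) (x : String) :
    x ∈ R.foldl (fun present i =>
        let w := String.ofList (PySem.List.slice t (some i) (some (i + L)))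
        if PySem.Set.contains pats w then PySem.Set.add present w else present) pr
      ↔ x ∈ pr ∨ ∃ i ∈ R, String.ofList (PySem.List.slice t (some i) (some (i + L))) = x
          ∧ PySem.Set.contains pats x = true := by
  induction R generalizing pr with
  | nil => simp
  | cons i R ih =>
    rw [List.foldl_cons, ih]
    simp only [List.mem_cons]
    by_cases hc : PySem.Set.contains pats (String.ofList (PySem.List.slice t (some i) (some (i + L)))) = true
    · simp only [hc, if_true, PySem.Set.mem_add]
      constructor
      · rintro ((h | rfl) | ⟨j, hj, hw, hcx⟩)
        · exact Or.inl h
        · exact Or.inr ⟨i, Or.inl rfl, rfl, hc⟩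
        · exact Or.inr ⟨j, Or.inr hj, hw, hcx⟩
      · rintro (h | ⟨j, (rfl | hj), hw, hcx⟩)
        · exact Or.inl (Or.inl h)
        · exact Or.inl (Or.inr hw.symm)
        · exact Or.inr ⟨j, hj, hw, hcx⟩
    · simp only [hc]
      constructor
      · rintro (h | ⟨j, hj, hw, hcx⟩)
        · exact Or.inl h
        · exact Or.inr ⟨j, Or.inr hj, hw, hcx⟩
      · rintro (h | ⟨j, (rfl | hj), hw, hcx⟩)
        · exact Or.inl h
        · exact absurd (hw ▸ hcx) hc
        · exact Or.inr ⟨j, hj, hw, hcx⟩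

lemma mem_outer_fold (t : List Char) (pats : PySem.Set String) (Ls : List Int)
    (pr : PySem.Set String) (x : String) :
    x ∈ Ls.foldl (fun present L =>
        if L ≤ (t.length : Int) then
          (PySem.List.pyRange 0 ((t.length : Int) - L + 1) 1).foldl (fun present i =>
            let w := String.ofList (PySem.List.slice t (some i) (some (i + L)))
            if PySem.Set.contains pats w then PySem.Set.add present w else present) present
        else present) pr
      ↔ x ∈ pr ∨ ∃ L ∈ Ls, L ≤ (t.length : Int)
          ∧ ∃ i ∈ PySem.List.pyRange 0 ((t.length : Int) - L + 1) 1,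
              String.ofList (PySem.List.slice t (some i) (some (i + L))) = x
                ∧ PySem.Set.contains pats x = true := by
  induction Ls generalizing pr with
  | nil => simp
  | cons L Ls ih =>
    rw [List.foldl_cons]
    by_cases hL : L ≤ (t.length : Int)
    · rw [if_pos hL, ih, mem_inner_fold]
      simp only [List.mem_cons]
      constructor
      · rintro ((h | ⟨i, hi, hw, hcx⟩) | ⟨M, hM, hMn, hrest⟩)
        · exact Or.inl h
        · exact Or.inr ⟨L, Or.inl rfl, hL, i, hi, hw, hcx⟩
        · exact Or.inr ⟨M, Or.inr hM, hMn, hrest⟩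
      · rintro (h | ⟨M, (rfl | hM), hMn, hrest⟩)
        · exact Or.inl (Or.inl h)
        · exact Or.inl (Or.inr hrest)
        · exact Or.inr ⟨M, hM, hMn, hrest⟩
    · rw [if_neg hL, ih]
      simp only [List.mem_cons]
      constructor
      · rintro (h | ⟨M, hM, hMn, hrest⟩)
        · exact Or.inl h
        · exact Or.inr ⟨M, Or.inr hM, hMn, hrest⟩
      · rintro (h | ⟨M, (rfl | hM), hMn, hrest⟩)
        · exact Or.inl h
        · exact absurd hMn hL
        · exact Or.inr ⟨M, hM, hMn, hrest⟩

-- for a pattern x, membership in B's 'present' set is exactly 'x in text'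
lemma contains_bPresent (t : List Char) (patterns : List String) (x : String)
    (hx : x ∈ patterns) :
    PySem.Set.contains (bPresent t patterns) x = PySem.Chars.isIn x.toList t := by
  have hmem : x ∈ bPresent t patterns ↔ PySem.Chars.isIn x.toList t = true := by
    unfold bPresent
    rw [mem_outer_fold]
    simp only [PySem.Set.empty, List.not_mem_nil, false_or]
    have hcx : PySem.Set.contains (PySem.Set.ofList patterns) x = true :=
      (PySem.Set.contains_iff _ _).mpr ((PySem.Set.mem_ofList _ _).mpr hx)
    constructor
    · rintro ⟨L, hL, hLn, i, hi, hw, -⟩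
      rw [PySem.List.mem_pyRange_one] at hi
      have hL0 : 0 ≤ L := by
        rcases (PySem.Set.mem_ofList _ _).mp hL with h
        rcases List.mem_map.mp h with ⟨p, -, rfl⟩
        positivity
      have hxl : x.toList = (t.drop i.toNat).take ((i + L).toNat - i.toNat) := by
        rw [← hw]
        rw [PySem.List.slice_toNat t hi.1 (by omega)]
        simp
      rw [← PySem.Chars.exists_prefix_drop_iff_isIn]
      exact ⟨i.toNat, hxl ▸ List.take_prefix _ _⟩
    · intro hin
      rcases (PySem.Chars.exists_prefix_drop_iff_isIn x.toList t).mpr hin with ⟨j, hj⟩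
      have hLmem : ((x.toList.length : Int)) ∈ PySem.Set.ofList
          (patterns.map (fun p => (p.toList.length : Int))) :=
        (PySem.Set.mem_ofList _ _).mpr (List.mem_map.mpr ⟨x, hx, rfl⟩)
      have hlen : x.toList.length ≤ t.length - j := by
        have := hj.length_le
        simpa using this
      by_cases h0 : x.toList.length = 0
      · -- empty pattern: window of length 0 at position 0
        have hx0 : x.toList = [] := List.eq_nil_of_length_eq_zero h0
        refine ⟨(x.toList.length : Int), hLmem, by omega, 0, ?_, ?_, hcx⟩
        · rw [PySem.List.mem_pyRange_one]; omega
        · apply String.toList_inj.mp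
          have hsl : PySem.List.slice t (some 0) (some (0 + (x.toList.length : Int)))
              = (t.drop (0:Nat)).take x.toList.length := by
            rw [PySem.List.slice_toNat t (by omega) (by omega)]
            congr 1; omega
          rw [hsl]
          simp [hx0]
      · -- nonempty: the prefix of drop j is the window at j
        have hjn : j ≤ t.length := by
          by_contra hgt
          have : t.drop j = [] := List.drop_eq_nil_of_le (by omega)
          rw [this] at hj
          exact h0 (by simpa using List.prefix_nil.mp hj)
        refine ⟨(x.toList.length : Int), hLmem, by omega, (j : Int), ?_, ?_, hcx⟩
        · rw [PySem.List.mem_pyRange_one]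
          constructor
          · positivity
          · omega
        · rw [PySem.List.slice_natCast_add]
          apply String.toList_inj.mp
          have : (t.drop j).take x.toList.length = x.toList := (List.prefix_iff_eq_take.mp hj).symm
          rw [this]
          simp
  by_cases h : PySem.Chars.isIn x.toList t = true
  · rw [h]
    exact (PySem.Set.contains_iff _ _).mpr (hmem.mpr h)
  · rw [Bool.not_eq_true] at h
    rw [h, Bool.eq_false_iff]
    intro hc
    have := hmem.mp ((PySem.Set.contains_iff _ _).mp hc)
    rw [h] at this
    exact Bool.false_ne_true this

-- 'if c(x): out.append(f(x))' over a list is filter-then-map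
lemma foldl_if_append (c : String → Bool) (f : String → String) (ps : List String) (acc : List String) :
    ps.foldl (fun fs p => if c p then fs ++ [f p] else fs) acc = acc ++ (ps.filter c).map f := by
  induction ps generalizing acc with
  | nil => simp
  | cons p ps ih => by_cases h : c p <;> simp [h, ih]

-- ===== VERDICT (by name: the statement is the Claim_ definition above) =====
theorem check_contains_spec : Claim_equal_check_contains := by
  intro text patterns negate _
  unfold Spec_check_contains
  have key : ∀ p ∈ patterns,
      PySem.Set.contains (bPresent text.toList patterns) p = PySem.Str.isIn p text := by
    intro p hp; rw [contains_bPresent _ _ _ hp]; simp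
  cases negate with
  | true =>
    show check_contains text patterns true = check_contains_alt text patterns true
    rw [show check_contains text patterns true
        = patterns.foldl (fun fs p => if PySem.Str.isIn p text then
            fs ++ ["unexpected pattern present: \"" ++ p ++ "\""] else fs) [] from rfl]
    rw [foldl_if_append]
    show _ = (patterns.filter (fun p =>
        PySem.Set.contains (bPresent text.toList patterns) p)).map _
    rw [List.filter_congr key]
    simp
  | false =>
    have key' : ∀ p ∈ patterns,
        (!PySem.Set.contains (bPresent text.toList patterns) p) = !PySem.Str.isIn p text := by
      intro p hp; rw [key p hp]
    show check_contains text patterns false = check_contains_alt text patterns false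
    rw [show check_contains text patterns false
        = patterns.foldl (fun fs p => if !PySem.Str.isIn p text then
            fs ++ ["missing expected pattern: \"" ++ p ++ "\""] else fs) [] from rfl]
    rw [foldl_if_append]
    show _ = (patterns.filter (fun p =>
        !PySem.Set.contains (bPresent text.toList patterns) p)).map _
    rw [List.filter_congr key']
    simp
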